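-- pv_equiv track=rewrite | github.com/IgorSantos1996/ComputerScienceAlgorithms | Variados/consecutivas.py | consec
-- ===== SOURCE A (Python) =====
-- def consec (word):
--     i = 0
--     contador = 0
--     while i < len(word) - 1:
--         if word[i] == word[i+1]:
--             contador = contador + 1
--             if contador == 3:
--                 return True
--             i = i + 2
--         else:
--             i = i + 1 - 2 * contador
--             contador = 0
--     return False
-- ===== SOURCE B (Python) =====
-- def consec(word):
--     for s in range(len(word) - 5):
--         if word[s] == word[s+1] and word[s+2] == word[s+3] and word[s+4] == word[s+5]:
--             return True
--     return False
-- ===== Notes on version B (the rewrite author's own statement) =====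
-- stated objective: simpler
-- what changed: Replaces A's stateful while-loop with a match counter and backtracking index reset by a flat for-loop over window starts s that directly tests the three aligned adjacent pairs word[s]==word[s+1], word[s+2]==word[s+3], word[s+4]==word[s+5].
import Mathlib
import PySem

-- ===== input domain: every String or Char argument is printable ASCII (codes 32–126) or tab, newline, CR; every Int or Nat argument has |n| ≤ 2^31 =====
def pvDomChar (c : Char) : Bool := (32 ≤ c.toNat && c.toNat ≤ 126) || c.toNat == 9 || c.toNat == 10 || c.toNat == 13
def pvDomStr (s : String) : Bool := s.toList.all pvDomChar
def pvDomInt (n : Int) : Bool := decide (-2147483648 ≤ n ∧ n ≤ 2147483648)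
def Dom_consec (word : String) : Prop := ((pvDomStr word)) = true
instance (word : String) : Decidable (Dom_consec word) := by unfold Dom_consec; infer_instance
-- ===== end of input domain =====

-- B replaces A's counter-and-backtrack while-loop by a flat fixed-window scan over the
-- starting index (simpler); return values agree on all inputs.

-- ===== PORT A =====
-- A's while-loop as a fuel-guarded recursion over the state (i, contador); the fuel
-- 4*len+7 only makes the recursion total — the proof shows it is never exhausted.
def consecLoop (w : List Char) (fuel : Nat) (i contador : Int) : Bool :=
  match fuel with
  | 0 => false
  | fuel + 1 =>
    if i < (w.length : Int) - 1 then
      if PySem.List.pyGet? w i == PySem.List.pyGet? w (i + 1) then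
        if contador + 1 == 3 then true
        else consecLoop w fuel (i + 2) (contador + 1)
      else consecLoop w fuel (i + 1 - 2 * contador) 0
    else false

def consec (word : String) : Bool :=
  consecLoop word.toList (4 * word.toList.length + 7) 0 0

-- ===== PORT B =====
-- Source B's 'for s in range(len(word)-5)' loop as recursion on s.
def consecScan (w : List Char) (s : Nat) : Bool :=
  if s + 5 < w.length then
    if (PySem.List.pyGet? w (s : Int) == PySem.List.pyGet? w ((s : Int) + 1))
        && (PySem.List.pyGet? w ((s : Int) + 2) == PySem.List.pyGet? w ((s : Int) + 3))
        && (PySem.List.pyGet? w ((s : Int) + 4) == PySem.List.pyGet? w ((s : Int) + 5)) then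
      true
    else consecScan w (s + 1)
  else false
termination_by w.length - s

def consec_alt (word : String) : Bool := consecScan word.toList 0

-- ===== PRECONDITION & SPEC =====
def Spec_consec (word : String) (out : Bool) : Prop := out = consec_alt word
instance (word : String) (out : Bool) : Decidable (Spec_consec word out) := by unfold Spec_consec; infer_instance

-- ===== CLAIM (what is proved, stated in full; the proofs are below) =====
def Claim_equal_consec : Prop := ∀ (word : String), Dom_consec word → Spec_consec word (consec word)

-- ===== LEMMAS AND PROOFS =====

-- Invariant: the loop state is (i, contador) = (s + 2c, c) where s is the current window
-- start, c < 3, and the first c adjacent pairs of the window at s already matched;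
-- with enough fuel the loop from that state returns exactly what B's scan returns from s.
lemma consecLoop_eq_scan (w : List Char) :
    ∀ (fuel s c : Nat), c < 3 →
      (∀ j < c, (PySem.List.pyGet? w ((s : Int) + 2 * j) == PySem.List.pyGet? w ((s : Int) + 2 * j + 1)) = true) →
      4 * (w.length + 1 - s) + (3 - c) ≤ fuel →
      consecLoop w fuel ((s : Int) + 2 * c) c = consecScan w s := by
  intro fuel
  induction fuel with
  | zero => intro s c hc _ hfuel; omega
  | succ fuel ih =>
    intro s c hc hinv hfuel
    rw [consecLoop]
    by_cases hlt : ((s : Int) + 2 * c < (w.length : Int) - 1)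
    · rw [if_pos hlt]
      have hs : s + 2 * c + 1 < w.length := by exact_mod_cast (by omega : (s : Int) + 2 * c + 1 < (w.length : Int))
      by_cases heq : (PySem.List.pyGet? w ((s : Int) + 2 * c) == PySem.List.pyGet? w ((s : Int) + 2 * c + 1)) = true
      · rw [if_pos heq]
        by_cases h3 : (c : Int) + 1 = 3
        · -- contador reaches 3: window at s is complete, scan finds it at once
          have hc2 : c = 2 := by omega
          subst hc2
          simp only [h3]
          rw [consecScan]
          have h0 := hinv 0 (by omega)
          have h1 := hinv 1 (by omega)
          push_cast at h0 h1 heq ⊢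
          rw [if_pos (by omega : s + 5 < w.length)]
          norm_num at h0 h1 heq ⊢
          exact Or.inl ⟨⟨h0, by rw [h1, show ((s:Int)+2+1) = (s:Int)+3 from by ring]⟩, by rw [heq, show ((s:Int)+4+1) = (s:Int)+5 from by ring]⟩
        · have hcne : ((c : Int) + 1 == 3) = false := by simp [h3]
          rw [hcne, if_neg (by simp)]
          have hc' : c + 1 < 3 := by omega
          have : ((s : Int) + 2 * c) + 2 = (s : Int) + 2 * ((c : Nat) + 1 : Nat) := by push_cast; ring
          rw [this]
          have : ((c : Int) + 1) = ((c + 1 : Nat) : Int) := by push_cast; ring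
          rw [this]
          apply ih s (c + 1) hc'
          · intro j hj
            by_cases hjc : j < c
            · exact hinv j hjc
            · have : j = c := by omega
              subst this; exact heq
          · omega
      · rw [if_neg heq]
        have hrec := ih (s + 1) 0 (by omega) (by intro j hj; omega) (by omega)
        norm_num at hrec
        rw [show (s : Int) + 2 * (c : Int) + 1 - 2 * (c : Int) = ((s : Int) + 1) from by ring]
        rw [hrec]
        -- scan s = scan (s+1): the window at s fails at pair c
        conv_rhs => rw [consecScan]
        by_cases hw : s + 5 < w.length
        · rw [if_pos hw]
          have hfail : (PySem.List.pyGet? w ((s : Int) + 2 * c) == PySem.List.pyGet? w ((s : Int) + 2 * c + 1)) = false := by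
            simpa using heq
          rw [if_neg]
          intro habs
          push_cast at hfail
          interval_cases c <;> norm_num at hfail habs
          · exact hfail habs.1.1
          · exact hfail (by rw [habs.1.2, show ((s:Int)+3) = (s:Int)+2+1 from by ring])
          · exact hfail (by rw [habs.2, show ((s:Int)+5) = (s:Int)+4+1 from by ring])
        · rw [if_neg hw, consecScan, if_neg (by omega)]
    · rw [if_neg hlt]
      rw [consecScan, if_neg (by omega)]

-- ===== VERDICT (by name: the statement is the Claim_ definition above) =====
theorem consec_spec : Claim_equal_consec := by
  intro word _
  unfold Spec_consec consec consec_alt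
  have h := consecLoop_eq_scan word.toList (4 * word.toList.length + 7) 0 0
    (by omega) (by intro j hj; omega) (by omega)
  simpa using h
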